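-- pv_equiv track=rewrite | github.com/ponir-techlogicians/lovecompatability | app/utils.py | adjacency_sum_steps_fixed_5
-- ===== SOURCE A (Python) =====
-- def adjacency_sum_steps_fixed_5(arr: list) -> list:
--     """Return 5 steps of adjacency summing (even if 2 elements reached early)."""
--     steps = [arr[:]]
--     while len(steps) < 5:
--         if len(arr) <= 2:
--             steps.append(arr[:])
--         else:
--             arr = [(arr[i] + arr[i + 1]) % 10 for i in range(len(arr) - 1)]
--             steps.append(arr[:])
--     return steps
-- ===== SOURCE B (Python) =====
-- def _pascal_row(r):
--     row = [1]
--     for _ in range(r):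
--         row = [1] + [row[j] + row[j + 1] for j in range(len(row) - 1)] + [1]
--     return row
--
--
-- def adjacency_sum_steps_fixed_5(arr: list) -> list:
--     n = len(arr)
--     res = []
--     for k in range(5):
--         r = min(k, max(n - 2, 0))
--         if r == 0:
--             res.append(arr[:])
--         else:
--             row = _pascal_row(r)
--             res.append([sum(row[j] * arr[i + j] for j in range(r + 1)) % 10
--                         for i in range(n - r)])
--     return res
-- ===== Notes on version B (the rewrite author's own statement) =====
-- stated objective: alternative
-- what changed: Instead of iteratively rebuilding a shrinking list five times, B computes each of the 5 steps directly from the original array as a closed-form convolution with Pascal-row (binomial) weights mod 10, with r = min(k, max(n-2, 0)) passes effectively applied.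
import Mathlib
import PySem

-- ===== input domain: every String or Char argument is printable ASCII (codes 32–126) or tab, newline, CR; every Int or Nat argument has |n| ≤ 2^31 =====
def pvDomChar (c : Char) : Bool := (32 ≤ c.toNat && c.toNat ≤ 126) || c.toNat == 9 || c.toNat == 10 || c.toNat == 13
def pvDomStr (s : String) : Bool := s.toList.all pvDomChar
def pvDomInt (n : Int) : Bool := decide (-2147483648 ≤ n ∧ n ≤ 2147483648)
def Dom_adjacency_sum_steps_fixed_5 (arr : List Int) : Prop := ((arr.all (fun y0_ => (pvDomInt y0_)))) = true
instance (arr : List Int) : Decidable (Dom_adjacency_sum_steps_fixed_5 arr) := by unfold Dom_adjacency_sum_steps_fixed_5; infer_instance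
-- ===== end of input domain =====

-- B replaces A's repeated adjacency-sum reduction by a closed form: step k is built
-- directly from the original array with Pascal-row (binomial) weights mod 10 (objective: alternative).

-- ===== PORT A =====
-- one reduction pass: [(arr[i] + arr[i + 1]) % 10 for i in range(len(arr) - 1)]
def pvPassA (arr : List Int) : List Int :=
  (PySem.List.pyRange 0 ((arr.length : Int) - 1) 1).map
    (fun i => PySem.Int.mod (PySem.List.pyGetD arr i 0 + PySem.List.pyGetD arr (i + 1) 0) 10)

-- the while loop: while len(steps) < 5: if len(arr) <= 2: append copy else reduce and append
def pvLoopA (steps : List (List Int)) (arr : List Int) : List (List Int) :=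
  if steps.length < 5 then
    if arr.length ≤ 2 then pvLoopA (steps ++ [arr]) arr
    else
      let arr' := pvPassA arr
      pvLoopA (steps ++ [arr']) arr'
  else steps
termination_by 5 - steps.length
decreasing_by all_goals simp; omega

def adjacency_sum_steps_fixed_5 (arr : List Int) : List (List Int) :=
  pvLoopA [arr] arr

-- ===== PORT B =====
-- _pascal_row(r): row = [1]; for _ in range(r): row = [1] + [row[j] + row[j+1] for j …] + [1]
def pvPascalRow (r : Nat) : List Int :=
  (List.range r).foldl
    (fun row _ =>
      1 :: ((List.range (row.length - 1)).map (fun j => row.getD j 0 + row.getD (j + 1) 0)) ++ [1])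
    [1]

-- [sum(row[j] * arr[i + j] for j in range(r + 1)) % 10 for i in range(n - r)]
def pvStepB (arr : List Int) (r : Nat) : List Int :=
  let row := pvPascalRow r
  (List.range (arr.length - r)).map (fun i =>
    PySem.Int.mod (((List.range (r + 1)).map (fun j => row.getD j 0 * arr.getD (i + j) 0)).sum) 10)

def adjacency_sum_steps_fixed_5_alt (arr : List Int) : List (List Int) :=
  (List.range 5).map (fun k =>
    let r := min k (max (arr.length - 2) 0)
    if r = 0 then arr else pvStepB arr r)

-- ===== PRECONDITION & SPEC =====
def Spec_adjacency_sum_steps_fixed_5 (arr : List Int) (out : List (List Int)) : Prop := out = adjacency_sum_steps_fixed_5_alt arr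
instance (arr : List Int) (out : List (List Int)) : Decidable (Spec_adjacency_sum_steps_fixed_5 arr out) := by unfold Spec_adjacency_sum_steps_fixed_5; infer_instance

-- ===== CLAIM (what is proved, stated in full; the proofs are below) =====
def Claim_equal_adjacency_sum_steps_fixed_5 : Prop := ∀ (arr : List Int), Dom_adjacency_sum_steps_fixed_5 arr → Spec_adjacency_sum_steps_fixed_5 arr (adjacency_sum_steps_fixed_5 arr)

-- ===== LEMMAS AND PROOFS =====

theorem pvGetD_cons_add_one (a : Int) (l : List Int) (n : Nat) (d : Int) :
    (a :: l).getD (n + 1) d = l.getD n d := List.getD_cons_succ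

-- one Pascal-row iteration, peeled off the foldl
theorem pvPascalRow_succ (r : Nat) :
    pvPascalRow (r + 1) =
      1 :: ((List.range ((pvPascalRow r).length - 1)).map
        (fun j => (pvPascalRow r).getD j 0 + (pvPascalRow r).getD (j + 1) 0)) ++ [1] := by
  simp [pvPascalRow, List.range_succ]

theorem pvPascalRow_length (r : Nat) : (pvPascalRow r).length = r + 1 := by
  induction r with
  | zero => rfl
  | succ r ih => simp [pvPascalRow_succ, ih]

theorem pvPascalRow_last (r : Nat) : (pvPascalRow r).getD r 0 = 1 := by
  induction r with
  | zero => rfl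
  | succ r ih =>
    rw [pvPascalRow_succ, pvPascalRow_length]; rw [List.cons_append, pvGetD_cons_add_one]; rw [
        List.getD_append_right _ _ _ _ (by simp)]
    simp

theorem pvPascalRow_head (r : Nat) : (pvPascalRow r).getD 0 0 = 1 := by
  cases r with
  | zero => rfl
  | succ r => simp [pvPascalRow_succ]

-- Pascal's rule on the row entries, with out-of-range entries read as 0
theorem pvPascalRow_getD_succ (r j : Nat) :
    (pvPascalRow (r + 1)).getD (j + 1) 0 =
      (pvPascalRow r).getD j 0 + (pvPascalRow r).getD (j + 1) 0 := by
  rw [pvPascalRow_succ, pvPascalRow_length]; rw [List.cons_append, pvGetD_cons_add_one]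
  rcases lt_trichotomy j r with h | h | h
  · rw [List.getD_append _ _ _ _ (by simpa using h),
        PySem.List.getD_map_range _ _ _ _ (by simpa using h)]
  · subst h
    rw [List.getD_append_right _ _ _ _ (by simp),
        pvPascalRow_last,
        List.getD_eq_default (pvPascalRow j) _ (by rw [pvPascalRow_length])]
    simp
  · rw [List.getD_append_right _ _ _ _ (by simp; omega),
        List.getD_eq_default (pvPascalRow r) _ (by rw [pvPascalRow_length]; omega),
        List.getD_eq_default (pvPascalRow r) _ (by rw [pvPascalRow_length]; omega),
        List.getD_eq_default _ _ (by simp; omega)]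
    simp

-- the convolution step behind Pascal's rule: weights P' = successor row of P
theorem pvConvSucc (P P' x : ℕ → ℤ) (r i : ℕ) (h0 : P' 0 = 1)
    (hs : ∀ j, P' (j + 1) = P j + P (j + 1)) (htop : P (r + 1) = 0) (hP0 : P 0 = 1) :
    ∑ j ∈ Finset.range (r + 2), P' j * x (i + j) =
      (∑ j ∈ Finset.range (r + 1), P j * x (i + j)) +
        ∑ j ∈ Finset.range (r + 1), P j * x (i + 1 + j) := by
  have hstar : (∑ j ∈ Finset.range (r + 1), P (j + 1) * x (i + (j + 1))) + P 0 * x (i + 0) =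
      ∑ j ∈ Finset.range (r + 1), P j * x (i + j) := by
    rw [← Finset.sum_range_succ' (fun j => P j * x (i + j)) (r + 1),
        Finset.sum_range_succ (fun j => P j * x (i + j)) (r + 1), htop]
    ring
  have hshift : (∑ j ∈ Finset.range (r + 1), P j * x (i + (j + 1))) =
      ∑ j ∈ Finset.range (r + 1), P j * x (i + 1 + j) := by
    refine Finset.sum_congr rfl fun j _ => ?_
    rw [show i + (j + 1) = i + 1 + j by omega]
  calc ∑ j ∈ Finset.range (r + 2), P' j * x (i + j)
      = (∑ j ∈ Finset.range (r + 1), P' (j + 1) * x (i + (j + 1))) + P' 0 * x (i + 0) :=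
        Finset.sum_range_succ' (fun j => P' j * x (i + j)) (r + 1)
    _ = (∑ j ∈ Finset.range (r + 1), (P j * x (i + (j + 1)) + P (j + 1) * x (i + (j + 1)))) + P' 0 * x (i + 0) := by
        simp only [hs, add_mul]
    _ = (∑ j ∈ Finset.range (r + 1), P j * x (i + (j + 1))) +
          ((∑ j ∈ Finset.range (r + 1), P (j + 1) * x (i + (j + 1))) + P 0 * x (i + 0)) := by
        rw [Finset.sum_add_distrib, h0, hP0]
        ring
    _ = (∑ j ∈ Finset.range (r + 1), P j * x (i + 1 + j)) +
          ∑ j ∈ Finset.range (r + 1), P j * x (i + j) := by rw [hstar, hshift]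
    _ = _ := by ring

-- the binomial-weighted sum of B, as a function of the start index i
def pvS (arr : List Int) (r i : Nat) : Int :=
  ((List.range (r + 1)).map (fun j => (pvPascalRow r).getD j 0 * arr.getD (i + j) 0)).sum

theorem pvS_succ (arr : List Int) (r i : Nat) :
    pvS arr (r + 1) i = pvS arr r i + pvS arr r (i + 1) :=
  pvConvSucc (fun j => (pvPascalRow r).getD j 0) (fun j => (pvPascalRow (r + 1)).getD j 0)
    (fun m => arr.getD m 0) r i (pvPascalRow_head (r + 1))
    (fun j => pvPascalRow_getD_succ r j)
    (List.getD_eq_default _ _ (by rw [pvPascalRow_length])) (pvPascalRow_head r)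

theorem pvStepB_eq (arr : List Int) (r : Nat) :
    pvStepB arr r = (List.range (arr.length - r)).map (fun i => PySem.Int.mod (pvS arr r i) 10) := rfl

theorem pvPassA_eq_map (arr : List Int) :
    pvPassA arr = (List.range (arr.length - 1)).map
      (fun i => PySem.Int.mod (arr.getD i 0 + arr.getD (i + 1) 0) 10) := by
  unfold pvPassA
  rw [PySem.List.pyRange_one, List.map_map,
      show ((arr.length : ℤ) - 1 - 0).toNat = arr.length - 1 by omega]
  refine List.map_congr_left fun k _ => ?_
  simp only [Function.comp]
  rw [show (0 : ℤ) + (k : ℤ) + 1 = ((k + 1 : ℕ) : ℤ) by push_cast; ring, zero_add,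
      PySem.List.pyGetD_natCast, PySem.List.pyGetD_natCast]

theorem pass_base (arr : List Int) : pvPassA arr = pvStepB arr 1 := by
  rw [pvPassA_eq_map, pvStepB_eq]
  refine List.map_congr_left fun i _ => ?_
  unfold pvS
  norm_num [List.range_succ, show pvPascalRow 1 = [1, 1] from rfl]

theorem pass_succ (arr : List Int) (r : Nat) :
    pvPassA (pvStepB arr r) = pvStepB arr (r + 1) := by
  rw [pvPassA_eq_map, pvStepB_eq, pvStepB_eq, List.length_map, List.length_range,
      show arr.length - r - 1 = arr.length - (r + 1) by omega]
  refine List.map_congr_left fun i hi => ?_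
  simp only [List.mem_range] at hi
  rw [PySem.List.getD_map_range _ _ _ _ (by omega), PySem.List.getD_map_range _ _ _ _ (by omega),
      pvS_succ]
  simp only [PySem.Int.mod_eq_emod_of_pos (by norm_num : (0:ℤ) < 10)]
  omega

theorem pvStepB_length (arr : List Int) (r : Nat) : (pvStepB arr r).length = arr.length - r := by
  simp [pvStepB]

theorem pvLoopA_app (steps : List (List Int)) (arr : List Int) (h1 : steps.length < 5)
    (h2 : arr.length ≤ 2) : pvLoopA steps arr = pvLoopA (steps ++ [arr]) arr := by
  conv_lhs => rw [pvLoopA]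
  simp [h1, h2]

theorem pvLoopA_pass (steps : List (List Int)) (arr : List Int) (h1 : steps.length < 5)
    (h2 : ¬ arr.length ≤ 2) :
    pvLoopA steps arr = pvLoopA (steps ++ [pvPassA arr]) (pvPassA arr) := by
  conv_lhs => rw [pvLoopA]
  simp [h1, h2]

theorem pvLoopA_done (steps : List (List Int)) (arr : List Int) (h1 : ¬ steps.length < 5) :
    pvLoopA steps arr = steps := by
  rw [pvLoopA]
  simp [h1]

theorem pvMain (arr : List Int) : adjacency_sum_steps_fixed_5 arr = adjacency_sum_steps_fixed_5_alt arr := by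
  have halt : adjacency_sum_steps_fixed_5_alt arr =
      [arr,
       if min 1 (max (arr.length - 2) 0) = 0 then arr else pvStepB arr (min 1 (max (arr.length - 2) 0)),
       if min 2 (max (arr.length - 2) 0) = 0 then arr else pvStepB arr (min 2 (max (arr.length - 2) 0)),
       if min 3 (max (arr.length - 2) 0) = 0 then arr else pvStepB arr (min 3 (max (arr.length - 2) 0)),
       if min 4 (max (arr.length - 2) 0) = 0 then arr else pvStepB arr (min 4 (max (arr.length - 2) 0))] := by
    simp [adjacency_sum_steps_fixed_5_alt, show List.range 5 = [0, 1, 2, 3, 4] from rfl]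
  rw [adjacency_sum_steps_fixed_5, halt]
  by_cases h2 : arr.length ≤ 2
  · rw [pvLoopA_app _ _ (by simp) h2, pvLoopA_app _ _ (by simp) h2, pvLoopA_app _ _ (by simp) h2,
        pvLoopA_app _ _ (by simp) h2, pvLoopA_done _ _ (by simp)]
    simp [show arr.length - 2 = 0 from by omega]
  · by_cases h3 : arr.length = 3
    · rw [pvLoopA_pass _ _ (by simp) h2, pass_base,
          pvLoopA_app _ _ (by simp) (by rw [pvStepB_length]; omega),
          pvLoopA_app _ _ (by simp) (by rw [pvStepB_length]; omega),
          pvLoopA_app _ _ (by simp) (by rw [pvStepB_length]; omega),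
          pvLoopA_done _ _ (by simp)]
      norm_num [show arr.length - 2 = 1 from by omega]
    · by_cases h4 : arr.length = 4
      · rw [pvLoopA_pass _ _ (by simp) h2, pass_base,
            pvLoopA_pass _ _ (by simp) (by rw [pvStepB_length]; omega), pass_succ,
            pvLoopA_app _ _ (by simp) (by rw [pvStepB_length]; omega),
            pvLoopA_app _ _ (by simp) (by rw [pvStepB_length]; omega),
            pvLoopA_done _ _ (by simp)]
        norm_num [show arr.length - 2 = 2 from by omega]
      · by_cases h5 : arr.length = 5
        · rw [pvLoopA_pass _ _ (by simp) h2, pass_base,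
              pvLoopA_pass _ _ (by simp) (by rw [pvStepB_length]; omega), pass_succ,
              pvLoopA_pass _ _ (by simp) (by rw [pvStepB_length]; omega), pass_succ,
              pvLoopA_app _ _ (by simp) (by rw [pvStepB_length]; omega),
              pvLoopA_done _ _ (by simp)]
          norm_num [show arr.length - 2 = 3 from by omega]
        · have h6 : 6 ≤ arr.length := by omega
          rw [pvLoopA_pass _ _ (by simp) h2, pass_base,
              pvLoopA_pass _ _ (by simp) (by rw [pvStepB_length]; omega), pass_succ,
              pvLoopA_pass _ _ (by simp) (by rw [pvStepB_length]; omega), pass_succ,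
              pvLoopA_pass _ _ (by simp) (by rw [pvStepB_length]; omega), pass_succ,
              pvLoopA_done _ _ (by simp)]
          rw [show max (arr.length - 2) 0 = arr.length - 2 from by omega,
              Nat.min_eq_left (by omega), Nat.min_eq_left (by omega),
              Nat.min_eq_left (by omega), Nat.min_eq_left (by omega)]
          simp

-- ===== VERDICT (by name: the statement is the Claim_ definition above) =====
theorem adjacency_sum_steps_fixed_5_spec : Claim_equal_adjacency_sum_steps_fixed_5 := by
  intro arr _
  exact pvMain arr
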